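-- pv_equiv track=rewrite | github.com/agarasia/DSA | Graphs/Problems on BFS or DFS/Rotten Oranges.py | timeToRot
-- ===== SOURCE A (Python) =====
-- from collections import deque
--
-- def timeToRot(grid):
--     queue = deque()
--     time, fresh = 0, 0
--     directions = [[1, 0], [-1, 0], [0, 1], [0, -1]]
--
--     for i in range(len(grid)):
--         for j in range(len(grid[0])):
--             if grid[i][j] == 1:
--                 fresh += 1
--             if grid[i][j] == 2:
--                 queue.append([i, j])
--
--     while queue and fresh:
--         for _ in range(len(queue)):
--             r, c = queue.popleft()
--             for dr, dc in directions:
--                 row, col = r + dr, c + dc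
--                 if ((row < 0 or row == len(grid)) or
--                 (col < 0 or col == len(grid[0])) or
--                 grid[row][col] != 1):
--                     continue
--                 grid[row][col] = 2
--                 queue.append([row, col])
--                 fresh -= 1
--         time += 1
--
--     return time if fresh == 0 else -1
-- ===== SOURCE B (Python) =====
-- def timeToRot(grid):
--     rows = len(grid)
--     cols = len(grid[0]) if rows else 0
--     g = [[grid[i][j] for j in range(cols)] for i in range(rows)]
--     minutes = 0
--     while True:
--         new_rot = [(i, j) for i in range(rows) for j in range(cols)
--                    if g[i][j] == 1 and any(
--                        0 <= ni < rows and 0 <= nj < cols and g[ni][nj] == 2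
--                        for ni, nj in ((i - 1, j), (i + 1, j), (i, j - 1), (i, j + 1)))]
--         if not new_rot:
--             break
--         for i, j in new_rot:
--             g[i][j] = 2
--         minutes += 1
--     if any(g[i][j] == 1 for i in range(rows) for j in range(cols)):
--         return -1
--     return minutes
-- ===== Notes on version B (the rewrite author's own statement) =====
-- stated objective: alternative
-- what changed: Replaces A's queue-based multi-source BFS with a queue-free cellular-automaton fixpoint: each minute B rescans the whole grid, collects every fresh cell adjacent to any rotten cell, rots them all synchronously, and repeats until a pass changes nothing; it also works on a local copy instead of mutating the argument.
import Mathlib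
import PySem

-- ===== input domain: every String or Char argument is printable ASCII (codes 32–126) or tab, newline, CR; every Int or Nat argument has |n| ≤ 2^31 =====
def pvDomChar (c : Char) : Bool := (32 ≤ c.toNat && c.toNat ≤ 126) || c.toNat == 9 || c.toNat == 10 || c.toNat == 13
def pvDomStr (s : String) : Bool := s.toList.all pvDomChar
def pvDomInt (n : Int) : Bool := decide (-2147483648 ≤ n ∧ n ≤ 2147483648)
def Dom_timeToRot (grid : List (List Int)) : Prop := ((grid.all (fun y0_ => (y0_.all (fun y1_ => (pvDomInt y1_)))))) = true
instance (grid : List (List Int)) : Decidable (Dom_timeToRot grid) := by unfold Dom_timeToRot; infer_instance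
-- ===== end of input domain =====

-- B replaces A's queue-based multi-source BFS by a queue-free cellular-automaton
-- fixpoint: each minute it rescans the whole grid, rots every fresh cell adjacent to a
-- rotten one synchronously, and stops when a pass changes nothing ("alternative").
-- A mutates `grid` in place (rotting cells to 2); B works on a local copy; the
-- equivalence proved here is about the return value.

-- ===== PORT A =====
-- grid[r][c] (read with default; only used where Python's access cannot raise)
def pvAt (g : List (List Int)) (r c : Int) : Int :=
  PySem.List.pyGetD (PySem.List.pyGetD g r []) c 0

-- grid[r][c] = 2 (in-place row update; only used with 0 ≤ r,c in range)
def pvSet2 (g : List (List Int)) (r c : Int) : List (List Int) :=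
  g.set r.toNat ((PySem.List.pyGetD g r []).set c.toNat 2)

def dirsA : List (Int × Int) := [(1, 0), (-1, 0), (0, 1), (0, -1)]

-- body of A's innermost `for dr, dc in directions` step (the `continue` branch)
def cellA (st : List (List Int) × List (Int × Int) × Int) (r c dr dc : Int) :
    List (List Int) × List (Int × Int) × Int :=
  let row := r + dr
  let col := c + dc
  if row < 0 ∨ row = (st.1.length : Int) ∨ col < 0 ∨ col = ((st.1.headD []).length : Int)
      ∨ pvAt st.1 row col ≠ 1 then st
  else (pvSet2 st.1 row col, st.2.1 ++ [(row, col)], st.2.2 - 1)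

-- one popped cell: scan the four directions
def stepA (st : List (List Int) × List (Int × Int) × Int) (rc : Int × Int) :
    List (List Int) × List (Int × Int) × Int :=
  dirsA.foldl (fun s p => cellA s rc.1 rc.2 p.1 p.2) st

-- A's inner `for _ in range(len(queue))`: pop every current cell; appends form the next level
def levelA (g : List (List Int)) (q : List (Int × Int)) (f : Int) :
    List (List Int) × List (Int × Int) × Int :=
  q.foldl stepA (g, ([] : List (Int × Int)), f)

-- A's `while queue and fresh` (fuel only makes the recursion structural; it is chosen
-- large enough below and the exhausted branch returns the loop's own exit expression)
def loopA : Nat → List (List Int) → List (Int × Int) → Int → Int → Int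
  | 0, _, _, f, t => if f = 0 then t else -1
  | fuel + 1, g, q, f, t =>
    if q ≠ [] ∧ f ≠ 0 then
      let st := levelA g q f
      loopA fuel st.1 st.2.1 st.2.2 (t + 1)
    else if f = 0 then t else -1

-- A's initial double scan (two independent `if`s, queue of pairs)
def scanA (g : List (List Int)) : Int × List (Int × Int) :=
  (PySem.List.pyRange 0 (g.length : Int) 1).foldl (fun acc i =>
    (PySem.List.pyRange 0 ((g.headD []).length : Int) 1).foldl (fun acc j =>
      let acc1 := if pvAt g i j = 1 then (acc.1 + 1, acc.2) else acc
      if pvAt g i j = 2 then (acc1.1, acc1.2 ++ [(i, j)]) else acc1) acc) (0, [])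

def timeToRot (grid : List (List Int)) : Int :=
  let fq := scanA grid
  loopA (fq.2.length + fq.1.natAbs + 1) grid fq.2 fq.1 0

-- ===== PORT B =====
-- the row-major list of cell coordinates `for i in range(rows) for j in range(cols)`
def cellsB (rows cols : Int) : List (Int × Int) :=
  (PySem.List.pyRange 0 rows 1).flatMap (fun i =>
    (PySem.List.pyRange 0 cols 1).map (fun j => (i, j)))

-- g = [[grid[i][j] for j in range(cols)] for i in range(rows)]
def copyB (grid : List (List Int)) (rows cols : Int) : List (List Int) :=
  (PySem.List.pyRange 0 rows 1).map (fun i =>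
    (PySem.List.pyRange 0 cols 1).map (fun j => pvAt grid i j))

-- any(0 <= ni < rows and 0 <= nj < cols and g[ni][nj] == 2 for ni, nj in …)
def hasRotNbrB (rows cols : Int) (g : List (List Int)) (i j : Int) : Bool :=
  [(i - 1, j), (i + 1, j), (i, j - 1), (i, j + 1)].any (fun p =>
    decide (0 ≤ p.1 ∧ p.1 < rows ∧ 0 ≤ p.2 ∧ p.2 < cols) && (pvAt g p.1 p.2 == 2))

-- the new_rot comprehension: fresh cells with a rotten neighbour, in row-major order
def newRotB (rows cols : Int) (g : List (List Int)) : List (Int × Int) :=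
  (cellsB rows cols).filter (fun p => (pvAt g p.1 p.2 == 1) && hasRotNbrB rows cols g p.1 p.2)

-- for i, j in new_rot: g[i][j] = 2
def rotAllB (g : List (List Int)) (l : List (Int × Int)) : List (List Int) :=
  l.foldl (fun h p => pvSet2 h p.1 p.2) g

-- B's `while True` loop (fuel rows*cols+1 is enough: every executed pass rots ≥ 1 cell)
def loopC (rows cols : Int) : Nat → List (List Int) → Int → List (List Int) × Int
  | 0, g, m => (g, m)
  | fuel + 1, g, m =>
    let nr := newRotB rows cols g
    if nr = [] then (g, m)
    else loopC rows cols fuel (rotAllB g nr) (m + 1)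

-- any(g[i][j] == 1 for i in range(rows) for j in range(cols))
def anyFreshB (rows cols : Int) (g : List (List Int)) : Bool :=
  (cellsB rows cols).any (fun p => pvAt g p.1 p.2 == 1)

def timeToRot_alt (grid : List (List Int)) : Int :=
  let rows : Int := (grid.length : Int)
  let cols : Int := if grid.length = 0 then 0 else ((grid.headD []).length : Int)
  let g0 := copyB grid rows cols
  let res := loopC rows cols (grid.length * (grid.headD []).length + 1) g0 0
  if anyFreshB rows cols res.1 then -1 else res.2

-- ===== PRECONDITION & SPEC =====
-- A raises IndexError on any nonempty grid with a row shorter than grid[0]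
-- (the scan reads grid[i][j] for all j < len(grid[0])); Pre_ excludes exactly those.
def Pre_timeToRot (grid : List (List Int)) : Prop :=
  ∀ row ∈ grid, (grid.headD []).length ≤ row.length

instance (grid : List (List Int)) : Decidable (Pre_timeToRot grid) := by
  unfold Pre_timeToRot; infer_instance

def pvWitness_timeToRot : List (List Int) := [[2, 1, 0], [1, 1, 0]]

def Spec_timeToRot (grid : List (List Int)) (out : Int) : Prop := out = timeToRot_alt grid
instance (grid : List (List Int)) (out : Int) : Decidable (Spec_timeToRot grid out) := by
  unfold Spec_timeToRot; infer_instance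

-- ===== CLAIM (what is proved, stated in full; the proofs are below) =====
def Claim_equal_timeToRot : Prop :=
  ∀ (grid : List (List Int)), Dom_timeToRot grid → Pre_timeToRot grid →
    Spec_timeToRot grid (timeToRot grid)

-- ===== LEMMAS AND PROOFS =====

-- shapes, bounds, adjacency, region-equality and the fresh-cell measure
def ShapeG (g : List (List Int)) (rows cols : Nat) : Prop :=
  g.length = rows ∧ (g.headD []).length = cols ∧ ∀ row ∈ g, cols ≤ row.length

def BndP (rows cols : Nat) (p : Int × Int) : Prop :=
  0 ≤ p.1 ∧ p.1 < (rows : Int) ∧ 0 ≤ p.2 ∧ p.2 < (cols : Int)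

def Adj (q p : Int × Int) : Prop := ∃ d ∈ dirsA, p = (q.1 + d.1, q.2 + d.2)

def EqR (rows cols : Nat) (g1 g2 : List (List Int)) : Prop :=
  ∀ p : Int × Int, BndP rows cols p → pvAt g1 p.1 p.2 = pvAt g2 p.1 p.2

def freshC (rows cols : Nat) (g : List (List Int)) : Nat :=
  (((cellsB rows cols).filter (fun p => pvAt g p.1 p.2 == 1))).length

theorem mem_cellsB (rows cols : Nat) (p : Int × Int) :
    p ∈ cellsB (rows : Int) (cols : Int) ↔ BndP rows cols p := by
  rcases p with ⟨x, y⟩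
  rw [cellsB, List.mem_flatMap]
  unfold BndP
  simp only [List.mem_map, PySem.List.mem_pyRange_one, Prod.mk.injEq]
  constructor
  · rintro ⟨i, hi, j, ⟨hj, h1, h2⟩⟩
    subst h1; subst h2; omega
  · rintro ⟨h1, h2, h3, h4⟩
    exact ⟨x, by omega, y, by omega, rfl, rfl⟩

theorem nodup_cellsB (rows cols : Nat) : (cellsB (rows : Int) (cols : Int)).Nodup := by
  rw [cellsB, List.nodup_flatMap]
  refine ⟨fun i _ => (PySem.List.nodup_pyRange_one 0 cols).map
    (fun a b h => by simpa using h), ?_⟩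
  refine (PySem.List.pairwise_lt_pyRange_one 0 rows).imp ?_
  intro a b hab p hp hq
  simp at hp hq
  obtain ⟨j1, _, h1⟩ := hp
  obtain ⟨j2, _, h2⟩ := hq
  rw [← h1] at h2
  simp at h2
  omega

theorem length_cellsB (rows cols : Nat) :
    (cellsB (rows : Int) (cols : Int)).length = rows * cols := by
  rw [cellsB, List.length_flatMap]
  simp [PySem.List.length_pyRange_one]

theorem pvRow_eq (g : List (List Int)) (r : Int) (hr : 0 ≤ r) (hrl : r.toNat < g.length) :
    PySem.List.pyGetD g r [] = g[r.toNat] := by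
  rw [PySem.List.pyGetD_eq_getElem _ _ hr (by omega)]

theorem pvAt_getD (g : List (List Int)) (x y : Int) (hx : 0 ≤ x) (hy : 0 ≤ y) :
    pvAt g x y = (g.getD x.toNat []).getD y.toNat 0 := by
  obtain ⟨n, rfl⟩ := Int.eq_ofNat_of_zero_le hx
  obtain ⟨m, rfl⟩ := Int.eq_ofNat_of_zero_le hy
  unfold pvAt
  rw [PySem.List.pyGetD_natCast, PySem.List.pyGetD_natCast]
  simp

theorem pvSet2_eq (g : List (List Int)) (r c : Int) (hr : 0 ≤ r) (hrl : r.toNat < g.length) :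
    pvSet2 g r c = g.set r.toNat ((g.getD r.toNat []).set c.toNat 2) := by
  unfold pvSet2
  rw [pvRow_eq g r hr hrl, List.getD_eq_getElem?_getD, List.getElem?_eq_getElem hrl]
  rfl

theorem pvAt_set2 (g : List (List Int)) (rows cols : Nat) (r c x y : Int)
    (hs : ShapeG g rows cols) (hrc : BndP rows cols (r, c)) (hxy : BndP rows cols (x, y)) :
    pvAt (pvSet2 g r c) x y = if x = r ∧ y = c then 2 else pvAt g x y := by
  obtain ⟨hL, hH, hRows⟩ := hs
  obtain ⟨hr0, hr1, hc0, hc1⟩ := hrc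
  obtain ⟨hx0, hx1, hy0, hy1⟩ := hxy
  simp only at hr0 hr1 hc0 hc1 hx0 hx1 hy0 hy1
  have hrn : r.toNat < g.length := by omega
  have hxn : x.toNat < g.length := by omega
  have hroweq : g.getD r.toNat [] = g[r.toNat] := by
    rw [List.getD_eq_getElem?_getD, List.getElem?_eq_getElem hrn]; rfl
  have hrow : cols ≤ (g.getD r.toNat []).length := by
    rw [hroweq]; exact hRows _ (List.getElem_mem hrn)
  rw [pvSet2_eq g r c hr0 hrn, pvAt_getD _ x y hx0 hy0]
  by_cases hxr : x = r
  · have hxeq : x.toNat = r.toNat := by omega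
    have hsel : (g.set r.toNat ((g.getD r.toNat []).set c.toNat 2)).getD x.toNat []
        = (g.getD r.toNat []).set c.toNat 2 := by
      rw [hxeq]
      simp [List.getD_eq_getElem?_getD, List.getElem?_set, hrn]
    rw [hsel]
    by_cases hyc : y = c
    · rw [if_pos ⟨hxr, hyc⟩, show y.toNat = c.toNat by omega]
      have hcl : c.toNat < (g[r.toNat]?.getD []).length := by
        rw [← List.getD_eq_getElem?_getD]; omega
      simp [List.getD_eq_getElem?_getD, hcl]
    · have hne : c.toNat ≠ y.toNat := by omega
      rw [if_neg (by tauto), pvAt_getD g x y hx0 hy0, hxeq]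
      simp [List.getD_eq_getElem?_getD, List.getElem?_set, hne]
  · have hne : r.toNat ≠ x.toNat := by omega
    rw [if_neg (by tauto), pvAt_getD g x y hx0 hy0]
    simp [List.getD_eq_getElem?_getD, List.getElem?_set, hne]

theorem headD_len_set (g : List (List Int)) (n : Nat) (v : List Int)
    (hlen : ∀ h : n < g.length, v.length = (g[n]).length) :
    ((g.set n v).headD []).length = (g.headD []).length := by
  rcases g with _ | ⟨a, t⟩
  · simp
  · cases n with
    | zero => simpa using hlen (by simp)
    | succ m => simp

theorem shape_pvSet2 (g : List (List Int)) (rows cols : Nat) (r c : Int)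
    (hs : ShapeG g rows cols) (hrc : BndP rows cols (r, c)) :
    ShapeG (pvSet2 g r c) rows cols := by
  obtain ⟨h1, h2, h3⟩ := hs
  obtain ⟨hr0, hr1, hc0, hc1⟩ := hrc
  simp only at hr0 hr1 hc0 hc1
  have hrn : r.toNat < g.length := by omega
  refine ⟨by simp [pvSet2, h1], ?_, ?_⟩
  · unfold pvSet2
    rw [pvRow_eq g r hr0 hrn]
    rw [headD_len_set]
    · exact h2
    · intro h; simp
  · intro row hrow
    rcases List.mem_or_eq_of_mem_set hrow with h | h
    · exact h3 row h
    · subst h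
      unfold pvSet2 at *
      rw [pvRow_eq g r hr0 hrn]
      simpa using h3 _ (List.getElem_mem hrn)

theorem shape_rotAll (g : List (List Int)) (rows cols : Nat) (S : List (Int × Int))
    (hs : ShapeG g rows cols) (hb : ∀ p ∈ S, BndP rows cols p) :
    ShapeG (rotAllB g S) rows cols := by
  induction S generalizing g with
  | nil => exact hs
  | cons p S ih =>
    have h1 : rotAllB g (p :: S) = rotAllB (pvSet2 g p.1 p.2) S := rfl
    rw [h1]
    exact ih _ (shape_pvSet2 g rows cols p.1 p.2 hs (hb p (List.mem_cons_self ..)))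
      (fun q hq => hb q (List.mem_cons_of_mem _ hq))

theorem pvAt_rotAll (rows cols : Nat) (S : List (Int × Int)) :
    ∀ (g : List (List Int)), ShapeG g rows cols → (∀ p ∈ S, BndP rows cols p) →
    ∀ x y : Int, BndP rows cols (x, y) →
      pvAt (rotAllB g S) x y = if (x, y) ∈ S then 2 else pvAt g x y := by
  induction S with
  | nil => intro g _ _ x y _; simp [rotAllB]
  | cons p S ih =>
    intro g hs hb x y hxy
    have h1 : rotAllB g (p :: S) = rotAllB (pvSet2 g p.1 p.2) S := rfl
    have hbp := hb p (List.mem_cons_self ..)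
    have hbp' : BndP rows cols (p.1, p.2) := hbp
    have hs' := shape_pvSet2 g rows cols p.1 p.2 hs hbp'
    rw [h1, ih _ hs' (fun q hq => hb q (List.mem_cons_of_mem _ hq)) x y hxy,
      pvAt_set2 g rows cols p.1 p.2 x y hs hbp' hxy]
    by_cases hmem : (x, y) ∈ S
    · simp [hmem]
    · by_cases hpe : (x, y) = p
      · have : x = p.1 ∧ y = p.2 := by rw [Prod.ext_iff] at hpe; exact hpe
        simp [hmem, hpe, this]
      · have : ¬(x = p.1 ∧ y = p.2) := by
          intro h; exact hpe (Prod.ext_iff.mpr ⟨h.1, h.2⟩)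
        simp [hmem, hpe, this]

theorem filter_length_flip {α : Type} [DecidableEq α] (l : List α) (p q : α → Bool) (a : α)
    (hn : l.Nodup) (ha : a ∈ l) (hpa : p a = true) (hqa : q a = false)
    (hrest : ∀ x ∈ l, x ≠ a → p x = q x) :
    (l.filter q).length + 1 = (l.filter p).length := by
  induction l with
  | nil => cases ha
  | cons h t ih =>
    obtain ⟨hht, hnt⟩ := List.nodup_cons.mp hn
    rcases List.mem_cons.mp ha with rfl | hat
    · have hft : t.filter p = t.filter q :=
        List.filter_congr (fun x hx =>
          (hrest x (List.mem_cons_of_mem _ hx) (fun e => hht (e ▸ hx))).symm) |>.symm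
      simp [List.filter_cons, hpa, hqa, hft]
    · have hha : h ≠ a := fun e => hht (e ▸ hat)
      have hph : p h = q h := hrest h (List.mem_cons_self ..) hha
      have := ih hnt hat (fun x hx hxa => hrest x (List.mem_cons_of_mem _ hx) hxa)
      cases hb : q h <;> simp [List.filter_cons, hph, hb] <;> omega

theorem freshC_set2 (g : List (List Int)) (rows cols : Nat) (r c : Int)
    (hs : ShapeG g rows cols) (hrc : BndP rows cols (r, c)) (h1 : pvAt g r c = 1) :
    freshC rows cols (pvSet2 g r c) + 1 = freshC rows cols g := by
  unfold freshC
  refine filter_length_flip _ _ _ (r, c) (nodup_cellsB rows cols)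
    ((mem_cellsB rows cols (r, c)).mpr hrc) (by simpa using h1) ?_ ?_
  · rw [pvAt_set2 g rows cols r c r c hs hrc hrc, if_pos ⟨rfl, rfl⟩]
    simp
  · intro x hx hxa
    have hbx := (mem_cellsB rows cols x).mp hx
    have hbx' : BndP rows cols (x.1, x.2) := hbx
    rw [pvAt_set2 g rows cols r c x.1 x.2 hs hrc hbx', if_neg]
    intro h
    exact hxa (Prod.ext_iff.mpr ⟨h.1, h.2⟩)

theorem freshC_rotAll (rows cols : Nat) (S : List (Int × Int)) :
    ∀ (g : List (List Int)), ShapeG g rows cols → S.Nodup →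
      (∀ p ∈ S, BndP rows cols p ∧ pvAt g p.1 p.2 = 1) →
      freshC rows cols (rotAllB g S) + S.length = freshC rows cols g := by
  induction S with
  | nil => intro g _ _ _; simp [rotAllB]
  | cons p S ih =>
    intro g hs hn hb
    obtain ⟨hpS, hnS⟩ := List.nodup_cons.mp hn
    have hbp := hb p (List.mem_cons_self ..)
    have hbp' : BndP rows cols (p.1, p.2) := hbp.1
    have h1 : rotAllB g (p :: S) = rotAllB (pvSet2 g p.1 p.2) S := rfl
    have hs' := shape_pvSet2 g rows cols p.1 p.2 hs hbp'
    have hfresh' : ∀ q ∈ S, BndP rows cols q ∧ pvAt (pvSet2 g p.1 p.2) q.1 q.2 = 1 := by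
      intro q hq
      have hbq := hb q (List.mem_cons_of_mem _ hq)
      have hbq' : BndP rows cols (q.1, q.2) := hbq.1
      refine ⟨hbq.1, ?_⟩
      rw [pvAt_set2 g rows cols p.1 p.2 q.1 q.2 hs hbp' hbq', if_neg, hbq.2]
      intro h
      have hqp : q = p := Prod.ext_iff.mpr ⟨h.1, h.2⟩
      exact hpS (hqp ▸ hq)
    have hrec := ih _ hs' hnS hfresh'
    have hone := freshC_set2 g rows cols p.1 p.2 hs hbp' hbp.2
    rw [h1]
    simp only [List.length_cons]
    omega

theorem freshC_zero_iff (rows cols : Nat) (g : List (List Int)) :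
    freshC rows cols g = 0 ↔ ∀ p : Int × Int, BndP rows cols p → pvAt g p.1 p.2 ≠ 1 := by
  unfold freshC
  rw [List.length_eq_zero_iff, List.filter_eq_nil_iff]
  constructor
  · intro h p hb
    have := h p ((mem_cellsB rows cols p).mpr hb)
    simpa using this
  · intro h p hp
    have := h p ((mem_cellsB rows cols p).mp hp)
    simpa using this

theorem anyFreshB_iff (rows cols : Nat) (g : List (List Int)) :
    anyFreshB (rows : Int) (cols : Int) g = true ↔ freshC rows cols g ≠ 0 := by
  unfold anyFreshB
  rw [List.any_eq_true, Ne, freshC_zero_iff]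
  push Not
  constructor
  · rintro ⟨p, hp, hv⟩
    exact ⟨p, (mem_cellsB rows cols p).mp hp, by simpa using hv⟩
  · rintro ⟨p, hb, hv⟩
    exact ⟨p, (mem_cellsB rows cols p).mpr hb, by simpa using hv⟩

theorem freshC_congr (rows cols : Nat) (g1 g2 : List (List Int)) (h : EqR rows cols g1 g2) :
    freshC rows cols g1 = freshC rows cols g2 := by
  unfold freshC
  congr 1
  refine List.filter_congr (fun x hx => ?_)
  rw [h x ((mem_cellsB rows cols x).mp hx)]

theorem hasRotNbr_iff (rows cols : Nat) (g : List (List Int)) (i j : Int) :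
    hasRotNbrB (rows : Int) (cols : Int) g i j = true ↔
      ∃ q : Int × Int, BndP rows cols q ∧ pvAt g q.1 q.2 = 2 ∧ Adj q (i, j) := by
  unfold hasRotNbrB
  simp only [List.any_cons, List.any_nil, Bool.or_false, Bool.or_eq_true, Bool.and_eq_true,
    decide_eq_true_eq, beq_iff_eq]
  constructor
  · rintro (⟨hb, hv⟩ | ⟨hb, hv⟩ | ⟨hb, hv⟩ | ⟨hb, hv⟩)
    · exact ⟨(i - 1, j), hb, hv, (1, 0), by simp [dirsA], by simp⟩
    · exact ⟨(i + 1, j), hb, hv, (-1, 0), by simp [dirsA], by simp⟩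
    · exact ⟨(i, j - 1), hb, hv, (0, 1), by simp [dirsA], by simp⟩
    · exact ⟨(i, j + 1), hb, hv, (0, -1), by simp [dirsA], by simp⟩
  · rintro ⟨⟨qx, qy⟩, hbq, hv, ⟨dx, dy⟩, hd, hp⟩
    obtain ⟨hb1, hb2, hb3, hb4⟩ := hbq
    simp only at hb1 hb2 hb3 hb4 hv
    rw [Prod.ext_iff] at hp
    simp only at hp
    obtain ⟨hp1, hp2⟩ := hp
    simp [dirsA, Prod.ext_iff] at hd
    rcases hd with ⟨rfl, rfl⟩ | ⟨rfl, rfl⟩ | ⟨rfl, rfl⟩ | ⟨rfl, rfl⟩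
    · refine Or.inl ⟨by constructor <;> [omega; constructor <;> [omega; constructor <;> omega]], ?_⟩
      rw [show i - 1 = qx by omega, show j = qy by omega]; exact hv
    · refine Or.inr (Or.inl ⟨by constructor <;> [omega; constructor <;> [omega; constructor <;> omega]], ?_⟩)
      rw [show i + 1 = qx by omega, show j = qy by omega]; exact hv
    · refine Or.inr (Or.inr (Or.inl ⟨by constructor <;> [omega; constructor <;> [omega; constructor <;> omega]], ?_⟩))
      rw [show i = qx by omega, show j - 1 = qy by omega]; exact hv
    · refine Or.inr (Or.inr (Or.inr ⟨by constructor <;> [omega; constructor <;> [omega; constructor <;> omega]], ?_⟩))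
      rw [show i = qx by omega, show j + 1 = qy by omega]; exact hv

theorem newRotB_congr (rows cols : Nat) (g1 g2 : List (List Int)) (h : EqR rows cols g1 g2) :
    newRotB (rows : Int) (cols : Int) g1 = newRotB (rows : Int) (cols : Int) g2 := by
  unfold newRotB
  refine List.filter_congr (fun x hx => ?_)
  have hbx := (mem_cellsB rows cols x).mp hx
  rw [h x hbx]
  congr 1
  unfold hasRotNbrB
  refine PySem.List.any_congr_mem ?_
  intro p hp
  by_cases hb : 0 ≤ p.1 ∧ p.1 < (rows : Int) ∧ 0 ≤ p.2 ∧ p.2 < (cols : Int)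
  · rw [h p hb]
  · simp [hb]

theorem mem_newRotB (rows cols : Nat) (g : List (List Int)) (p : Int × Int) :
    p ∈ newRotB (rows : Int) (cols : Int) g ↔
      BndP rows cols p ∧ pvAt g p.1 p.2 = 1 ∧
        ∃ q : Int × Int, BndP rows cols q ∧ pvAt g q.1 q.2 = 2 ∧ Adj q p := by
  unfold newRotB
  rw [List.mem_filter, mem_cellsB, Bool.and_eq_true, beq_iff_eq]
  rcases p with ⟨x, y⟩
  rw [hasRotNbr_iff rows cols g x y]

theorem EqR_copyB (grid : List (List Int)) (rows cols : Nat)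
    (hr : grid.length = rows) :
    EqR rows cols (copyB grid (rows : Int) (cols : Int)) grid := by
  rintro ⟨x, y⟩ ⟨h1, h2, h3, h4⟩
  simp only at h1 h2 h3 h4
  show pvAt _ x y = pvAt grid x y
  unfold copyB pvAt
  rw [PySem.List.pyGetD_map_pyRange_of_nonneg _ _ _ _ h1 h2,
    PySem.List.pyGetD_map_pyRange_of_nonneg _ _ _ _ h3 h4]

theorem shape_copyB (grid : List (List Int)) (rows cols : Nat)
    (hr : grid.length = rows) (hc : rows ≠ 0 → (grid.headD []).length = cols)
    (hc0 : rows = 0 → cols = 0) :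
    ShapeG (copyB grid (rows : Int) (cols : Int)) rows cols := by
  refine ⟨by simp [copyB, PySem.List.length_pyRange_one], ?_, ?_⟩
  · by_cases h0 : rows = 0
    · subst h0
      rw [show ((0 : Nat) : Int) = 0 from rfl]
      simp [copyB, PySem.List.pyRange_one_eq_nil (by omega : (0:Int) ≤ 0)]
      omega
    · have : (0 : Int) < (rows : Int) := by omega
      rw [copyB, PySem.List.pyRange_one_cons this]
      simp [PySem.List.length_pyRange_one]
  · intro row hrow
    rw [copyB] at hrow
    obtain ⟨i, _, hi⟩ := List.mem_map.mp hrow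
    rw [← hi]
    simp [PySem.List.length_pyRange_one]

theorem rotAll_append_singleton (g : List (List Int)) (S : List (Int × Int)) (p : Int × Int) :
    rotAllB g (S ++ [p]) = pvSet2 (rotAllB g S) p.1 p.2 := by
  unfold rotAllB
  rw [List.foldl_append]
  rfl

-- evaluating one `for dr, dc` step of A against the rotted-so-far set S
theorem cellA_eval_pos (rows cols : Nat) (g : List (List Int)) (S : List (Int × Int))
    (qA : List (Int × Int)) (f : Int) (q0 d0 : Int × Int)
    (hs : ShapeG g rows cols) (hSb : ∀ p ∈ S, BndP rows cols p)
    (hq0 : BndP rows cols q0) (hd0 : d0 ∈ dirsA)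
    (hrot : BndP rows cols (q0.1 + d0.1, q0.2 + d0.2) ∧ (q0.1 + d0.1, q0.2 + d0.2) ∉ S ∧
      pvAt g (q0.1 + d0.1) (q0.2 + d0.2) = 1) :
    cellA (rotAllB g S, qA, f) q0.1 q0.2 d0.1 d0.2 =
      (rotAllB g (S ++ [(q0.1 + d0.1, q0.2 + d0.2)]),
        qA ++ [(q0.1 + d0.1, q0.2 + d0.2)], f - 1) := by
  obtain ⟨dx, dy⟩ := d0
  obtain ⟨qx, qy⟩ := q0
  have hG := shape_rotAll g rows cols S hs hSb
  obtain ⟨hGL, hGH, _⟩ := hG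
  simp only [cellA, hGL, hGH]
  obtain ⟨hbp, hnS, hfr⟩ := hrot
  obtain ⟨hb1, hb2, hb3, hb4⟩ := hbp
  simp only at hb1 hb2 hb3 hb4
  rw [if_neg, rotAll_append_singleton g S (qx + dx, qy + dy)]
  push Not
  refine ⟨by omega, by omega, by omega, by omega, ?_⟩
  rw [pvAt_rotAll rows cols S g hs hSb _ _ ⟨hb1, hb2, hb3, hb4⟩, if_neg hnS]
  exact hfr

theorem cellA_eval_neg (rows cols : Nat) (g : List (List Int)) (S : List (Int × Int))
    (qA : List (Int × Int)) (f : Int) (q0 d0 : Int × Int)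
    (hs : ShapeG g rows cols) (hSb : ∀ p ∈ S, BndP rows cols p)
    (hq0 : BndP rows cols q0) (hd0 : d0 ∈ dirsA)
    (hrot : ¬(BndP rows cols (q0.1 + d0.1, q0.2 + d0.2) ∧ (q0.1 + d0.1, q0.2 + d0.2) ∉ S ∧
      pvAt g (q0.1 + d0.1) (q0.2 + d0.2) = 1)) :
    cellA (rotAllB g S, qA, f) q0.1 q0.2 d0.1 d0.2 = (rotAllB g S, qA, f) := by
  obtain ⟨dx, dy⟩ := d0
  obtain ⟨qx, qy⟩ := q0
  obtain ⟨hq1, hq2, hq3, hq4⟩ := hq0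
  simp only at hq1 hq2 hq3 hq4
  have hG := shape_rotAll g rows cols S hs hSb
  obtain ⟨hGL, hGH, _⟩ := hG
  have hrange : -1 ≤ qx + dx ∧ qx + dx ≤ (rows : Int) ∧ -1 ≤ qy + dy ∧ qy + dy ≤ (cols : Int) := by
    simp [dirsA, Prod.ext_iff] at hd0
    rcases hd0 with ⟨rfl, rfl⟩ | ⟨rfl, rfl⟩ | ⟨rfl, rfl⟩ | ⟨rfl, rfl⟩ <;> omega
  simp only [cellA, hGL, hGH]
  rw [if_pos]
  by_cases hbp : BndP rows cols (qx + dx, qy + dy)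
  · obtain ⟨hb1, hb2, hb3, hb4⟩ := hbp
    simp only at hb1 hb2 hb3 hb4
    by_cases hnS : (qx + dx, qy + dy) ∈ S
    · refine Or.inr (Or.inr (Or.inr (Or.inr ?_)))
      rw [pvAt_rotAll rows cols S g hs hSb _ _ ⟨hb1, hb2, hb3, hb4⟩, if_pos hnS]
      decide
    · have hfr : pvAt g (qx + dx) (qy + dy) ≠ 1 := by
        intro h; exact hrot ⟨⟨hb1, hb2, hb3, hb4⟩, hnS, h⟩
      refine Or.inr (Or.inr (Or.inr (Or.inr ?_)))
      rw [pvAt_rotAll rows cols S g hs hSb _ _ ⟨hb1, hb2, hb3, hb4⟩, if_neg hnS]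
      exact hfr
  · have : ¬(0 ≤ qx + dx ∧ qx + dx < (rows : Int) ∧ 0 ≤ qy + dy ∧ qy + dy < (cols : Int)) := hbp
    have hd : qx + dx < 0 ∨ qx + dx = (rows : Int) ∨ qy + dy < 0 ∨ qy + dy = (cols : Int) := by
      omega
    tauto

-- A's four-direction scan from one queue cell, relative to already-rotted set S
theorem cellsA_char (rows cols : Nat) (g : List (List Int)) (hs : ShapeG g rows cols)
    (q0 : Int × Int) (hq0 : BndP rows cols q0) (ds : List (Int × Int))
    (hds : ∀ d ∈ ds, d ∈ dirsA) :
    ∀ (S : List (Int × Int)) (qA : List (Int × Int)) (f : Int), S.Nodup →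
      (∀ p ∈ S, BndP rows cols p ∧ pvAt g p.1 p.2 = 1) →
      ∃ M : List (Int × Int),
        ds.foldl (fun s d => cellA s q0.1 q0.2 d.1 d.2) (rotAllB g S, qA, f)
          = (rotAllB g (S ++ M), qA ++ M, f - (M.length : Int)) ∧
        (S ++ M).Nodup ∧ (∀ p ∈ M, BndP rows cols p ∧ pvAt g p.1 p.2 = 1) ∧
        (∀ p : Int × Int, p ∈ S ++ M ↔ p ∈ S ∨
          (BndP rows cols p ∧ pvAt g p.1 p.2 = 1 ∧
            ∃ d ∈ ds, p = (q0.1 + d.1, q0.2 + d.2))) := by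
  induction ds with
  | nil =>
    intro S qA f hnd hSf
    exact ⟨[], by simp, by simpa using hnd, by simp, by simp⟩
  | cons d0 ds ih =>
    intro S qA f hnd hSf
    have hds' : ∀ d ∈ ds, d ∈ dirsA := fun d hd => hds d (List.mem_cons_of_mem _ hd)
    have hd0 : d0 ∈ dirsA := hds d0 (List.mem_cons_self ..)
    have hSb : ∀ p ∈ S, BndP rows cols p := fun p hp => (hSf p hp).1
    rw [List.foldl_cons]
    set p0 : Int × Int := (q0.1 + d0.1, q0.2 + d0.2) with hp0
    by_cases hrot : BndP rows cols p0 ∧ p0 ∉ S ∧ pvAt g p0.1 p0.2 = 1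
    · rw [cellA_eval_pos rows cols g S qA f q0 d0 hs hSb hq0 hd0 hrot]
      have hnd' : (S ++ [p0]).Nodup := by
        simp only [List.nodup_append, List.nodup_singleton, true_and]
        refine ⟨hnd, ?_⟩
        intro a ha b hb
        rw [List.mem_singleton.mp hb] at *
        intro heq
        exact hrot.2.1 (heq ▸ ha)
      have hSf' : ∀ p ∈ S ++ [p0], BndP rows cols p ∧ pvAt g p.1 p.2 = 1 := by
        intro p hp
        rcases List.mem_append.mp hp with h | h
        · exact hSf p h
        · rw [List.mem_singleton.mp h]
          exact ⟨hrot.1, hrot.2.2⟩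
      obtain ⟨M', hfold, hnd2, hMf, hmem⟩ := ih hds' (S ++ [p0]) (qA ++ [p0]) (f - 1) hnd' hSf'
      refine ⟨p0 :: M', ?_, ?_, ?_, ?_⟩
      · rw [hfold]
        have e1 : (S ++ [p0]) ++ M' = S ++ (p0 :: M') := by simp
        have e2 : (qA ++ [p0]) ++ M' = qA ++ (p0 :: M') := by simp
        have e3 : f - 1 - (M'.length : Int) = f - ((p0 :: M').length : Int) := by
          simp [List.length_cons]; push_cast; ring
        rw [e1, e2, e3]
      · have e1 : (S ++ [p0]) ++ M' = S ++ (p0 :: M') := by simp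
        rw [e1] at hnd2
        exact hnd2
      · intro p hp
        rcases List.mem_cons.mp hp with rfl | hp
        · exact ⟨hrot.1, hrot.2.2⟩
        · exact hMf p hp
      · intro p
        have e1 : (S ++ [p0]) ++ M' = S ++ (p0 :: M') := by simp
        have := hmem p
        rw [e1] at this
        rw [this]
        constructor
        · rintro (h | h)
          · rcases List.mem_append.mp h with h | h
            · exact Or.inl h
            · rw [List.mem_singleton.mp h]
              exact Or.inr ⟨hrot.1, hrot.2.2, d0, List.mem_cons_self .., rfl⟩
          · obtain ⟨h1, h2, d, hd, he⟩ := h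
            exact Or.inr ⟨h1, h2, d, List.mem_cons_of_mem _ hd, he⟩
        · rintro (h | ⟨h1, h2, d, hd, he⟩)
          · exact Or.inl (List.mem_append.mpr (Or.inl h))
          · rcases List.mem_cons.mp hd with rfl | hd
            · exact Or.inl (List.mem_append.mpr (Or.inr (by simp [he, hp0])))
            · exact Or.inr ⟨h1, h2, d, hd, he⟩
    · rw [cellA_eval_neg rows cols g S qA f q0 d0 hs hSb hq0 hd0 hrot]
      obtain ⟨M', hfold, hnd2, hMf, hmem⟩ := ih hds' S qA f hnd hSf
      refine ⟨M', hfold, hnd2, hMf, ?_⟩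
      intro p
      rw [hmem p]
      constructor
      · rintro (h | ⟨h1, h2, d, hd, he⟩)
        · exact Or.inl h
        · exact Or.inr ⟨h1, h2, d, List.mem_cons_of_mem _ hd, he⟩
      · rintro (h | ⟨h1, h2, d, hd, he⟩)
        · exact Or.inl h
        · rcases List.mem_cons.mp hd with rfl | hd
          · rw [← hp0] at he
            have hS : p0 ∈ S := by
              by_contra hns
              exact hrot ⟨he ▸ h1, hns, by rw [← he]; exact h2⟩
            exact Or.inl (by rw [he]; exact hS)
          · exact Or.inr ⟨h1, h2, d, hd, he⟩

-- A's whole level, relative to already-rotted set S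
theorem levelA_char (rows cols : Nat) (g : List (List Int)) (hs : ShapeG g rows cols) :
    ∀ (Q S qA : List (Int × Int)) (f : Int), (∀ q ∈ Q, BndP rows cols q) → S.Nodup →
      (∀ p ∈ S, BndP rows cols p ∧ pvAt g p.1 p.2 = 1) →
      ∃ N : List (Int × Int),
        Q.foldl stepA (rotAllB g S, qA, f)
          = (rotAllB g (S ++ N), qA ++ N, f - (N.length : Int)) ∧
        (S ++ N).Nodup ∧ (∀ p ∈ N, BndP rows cols p ∧ pvAt g p.1 p.2 = 1) ∧
        (∀ p : Int × Int, p ∈ S ++ N ↔ p ∈ S ∨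
          (BndP rows cols p ∧ pvAt g p.1 p.2 = 1 ∧ ∃ q ∈ Q, Adj q p)) := by
  intro Q
  induction Q with
  | nil =>
    intro S qA f _ hnd hSf
    exact ⟨[], by simp, by simpa using hnd, by simp, by simp⟩
  | cons q0 Q ih =>
    intro S qA f hQb hnd hSf
    have hq0 : BndP rows cols q0 := hQb q0 (List.mem_cons_self ..)
    have hQb' : ∀ q ∈ Q, BndP rows cols q := fun q hq => hQb q (List.mem_cons_of_mem _ hq)
    rw [List.foldl_cons]
    obtain ⟨M, hfold, hndM, hMf, hmemM⟩ :=
      cellsA_char rows cols g hs q0 hq0 dirsA (fun d hd => hd) S qA f hnd hSf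
    have hstep : stepA (rotAllB g S, qA, f) q0
        = (rotAllB g (S ++ M), qA ++ M, f - (M.length : Int)) := by
      show dirsA.foldl (fun s p => cellA s q0.1 q0.2 p.1 p.2) (rotAllB g S, qA, f) = _
      exact hfold
    rw [hstep]
    have hSf2 : ∀ p ∈ S ++ M, BndP rows cols p ∧ pvAt g p.1 p.2 = 1 := by
      intro p hp
      rcases List.mem_append.mp hp with h | h
      · exact hSf p h
      · exact hMf p h
    obtain ⟨N', hfold2, hndN, hNf, hmemN⟩ := ih (S ++ M) (qA ++ M) (f - (M.length : Int)) hQb' hndM hSf2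
    refine ⟨M ++ N', ?_, ?_, ?_, ?_⟩
    · rw [hfold2]
      have e1 : (S ++ M) ++ N' = S ++ (M ++ N') := by simp
      have e2 : (qA ++ M) ++ N' = qA ++ (M ++ N') := by simp
      have e3 : f - (M.length : Int) - (N'.length : Int) = f - ((M ++ N').length : Int) := by
        simp [List.length_append]; push_cast; ring
      rw [e1, e2, e3]
    · have e1 : (S ++ M) ++ N' = S ++ (M ++ N') := by simp
      rw [e1] at hndN
      exact hndN
    · intro p hp
      rcases List.mem_append.mp hp with h | h
      · exact hMf p h
      · exact hNf p h
    · intro p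
      have e1 : (S ++ M) ++ N' = S ++ (M ++ N') := by simp
      have h2 := hmemN p
      rw [e1] at h2
      rw [h2]
      have h1 := hmemM p
      constructor
      · rintro (h | ⟨hb, hf, q, hq, hadj⟩)
        · rcases h1.mp h with h | ⟨hb, hf, d, hd, he⟩
          · exact Or.inl h
          · exact Or.inr ⟨hb, hf, q0, List.mem_cons_self .., d, hd, he⟩
        · exact Or.inr ⟨hb, hf, q, List.mem_cons_of_mem _ hq, hadj⟩
      · rintro (h | ⟨hb, hf, q, hq, hadj⟩)
        · exact Or.inl (h1.mpr (Or.inl h))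
        · rcases List.mem_cons.mp hq with rfl | hq
          · obtain ⟨d, hd, he⟩ := hadj
            exact Or.inl (h1.mpr (Or.inr ⟨hb, hf, d, hd, he⟩))
          · exact Or.inr ⟨hb, hf, q, hq, hadj⟩

theorem cellsB_filter (rows cols : Int) (p : Int × Int → Bool) :
    (cellsB rows cols).filter p
      = (PySem.List.pyRange 0 rows 1).flatMap (fun i =>
          ((PySem.List.pyRange 0 cols 1).filter (fun j => p (i, j))).map (fun j => (i, j))) := by
  unfold cellsB
  rw [List.filter_flatMap]
  simp [List.filter_map, Function.comp_def]

theorem freshC_eq_sum (rows cols : Nat) (g : List (List Int)) :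
    freshC rows cols g
      = ((PySem.List.pyRange 0 (rows : Int) 1).map (fun i =>
          (PySem.List.pyRange 0 (cols : Int) 1).countP (fun j => pvAt g i j == 1))).sum := by
  unfold freshC
  rw [cellsB_filter, List.length_flatMap]
  simp [List.filter_map, List.countP_eq_length_filter, Function.comp_def]

theorem scanA_inner (g : List (List Int)) (i : Int) (l : List Int) :
    ∀ (f0 : Int) (q0 : List (Int × Int)),
      l.foldl (fun acc j =>
          let acc1 := if pvAt g i j = 1 then (acc.1 + 1, acc.2) else acc
          if pvAt g i j = 2 then (acc1.1, acc1.2 ++ [(i, j)]) else acc1) (f0, q0)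
        = (f0 + ((l.countP (fun j => pvAt g i j == 1) : Nat) : Int),
           q0 ++ (l.filter (fun j => pvAt g i j == 2)).map (fun j => (i, j))) := by
  induction l with
  | nil => intro f0 q0; simp
  | cons j l ih =>
    intro f0 q0
    rw [List.foldl_cons]
    by_cases h1 : pvAt g i j = 1
    · have h2 : ¬pvAt g i j = 2 := by rw [h1]; decide
      simp only [h1, h2, if_pos, if_neg, ite_true, ite_false]
      rw [ih]
      simp [List.countP_cons, List.filter_cons, h1, h2]
      push_cast
      ring
    · by_cases h2 : pvAt g i j = 2
      · simp only [h1, h2, ite_true, ite_false]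
        rw [ih]
        simp [List.countP_cons, List.filter_cons, h1, h2]
      · simp only [h1, h2, ite_false]
        rw [ih]
        simp [List.countP_cons, List.filter_cons, h1, h2]

theorem scanA_outer (g : List (List Int)) (cols : Nat) (li : List Int) :
    ∀ (f0 : Int) (q0 : List (Int × Int)),
      li.foldl (fun acc i =>
        (PySem.List.pyRange 0 (cols : Int) 1).foldl (fun acc j =>
          let acc1 := if pvAt g i j = 1 then (acc.1 + 1, acc.2) else acc
          if pvAt g i j = 2 then (acc1.1, acc1.2 ++ [(i, j)]) else acc1) acc) (f0, q0)
      = (f0 + (((li.map (fun i =>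
            (PySem.List.pyRange 0 (cols : Int) 1).countP (fun j => pvAt g i j == 1))).sum : Nat) : Int),
         q0 ++ li.flatMap (fun i =>
            ((PySem.List.pyRange 0 (cols : Int) 1).filter (fun j => pvAt g i j == 2)).map
              (fun j => (i, j)))) := by
  induction li with
  | nil => intro f0 q0; simp
  | cons i li ih =>
    intro f0 q0
    rw [List.foldl_cons, scanA_inner g i _ f0 q0, ih]
    simp only [List.map_cons, List.sum_cons, List.flatMap_cons, Prod.mk.injEq]
    refine ⟨by push_cast; ring, by simp⟩

-- A's initial scan: fresh count and the row-major list of rotten cells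
theorem scanA_spec (g : List (List Int)) (rows cols : Nat) (hs : ShapeG g rows cols) :
    scanA g = (((freshC rows cols g : Nat) : Int),
      (cellsB (rows : Int) (cols : Int)).filter (fun p => pvAt g p.1 p.2 == 2)) := by
  obtain ⟨hL, hH, _⟩ := hs
  unfold scanA
  rw [hL, hH, scanA_outer g cols (PySem.List.pyRange 0 (rows : Int) 1) 0 [],
    cellsB_filter, freshC_eq_sum]
  simp

theorem loopA_nil (k : Nat) (g : List (List Int)) (f t : Int) :
    loopA k g [] f t = if f = 0 then t else -1 := by
  cases k <;> simp [loopA]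

theorem loopC_stop (rows cols : Int) (fb : Nat) (g : List (List Int)) (t : Int)
    (h : newRotB rows cols g = []) :
    loopC rows cols (fb + 1) g t = (g, t) := by
  rw [loopC]
  simp [h]

theorem loopC_step (rows cols : Int) (fb : Nat) (g : List (List Int)) (t : Int)
    (h : newRotB rows cols g ≠ []) :
    loopC rows cols (fb + 1) g t
      = loopC rows cols fb (rotAllB g (newRotB rows cols g)) (t + 1) := by
  rw [loopC]
  simp only [if_neg h]

-- the main simulation: A's while-loop against B's fixpoint loop plus final scan
theorem simAB (rows cols : Nat) :
    ∀ (fuelB fuelA : Nat) (gA gB : List (List Int)) (Q : List (Int × Int)) (f t : Int),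
      ShapeG gA rows cols → ShapeG gB rows cols → EqR rows cols gA gB →
      f = ((freshC rows cols gA : Nat) : Int) →
      (∀ q ∈ Q, BndP rows cols q ∧ pvAt gA q.1 q.2 = 2) →
      (∀ p q : Int × Int, BndP rows cols p → pvAt gA p.1 p.2 = 1 →
        BndP rows cols q → pvAt gA q.1 q.2 = 2 → Adj q p → q ∈ Q) →
      1 ≤ fuelA → (Q ≠ [] → freshC rows cols gA + 2 ≤ fuelA) →
      freshC rows cols gA + 1 ≤ fuelB →
      loopA fuelA gA Q f t
        = (if anyFreshB (rows : Int) (cols : Int) (loopC (rows : Int) (cols : Int) fuelB gB t).1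
           then -1 else (loopC (rows : Int) (cols : Int) fuelB gB t).2) := by
  intro fuelB
  induction fuelB with
  | zero =>
    intro fuelA gA gB Q f t _ _ _ _ _ _ _ _ hB1
    omega
  | succ fb ih =>
    intro fuelA gA gB Q f t hsA hsB heq hf hQv hFI hA1 hA2 hB1
    have heq' : EqR rows cols gB gA := fun p hp => (heq p hp).symm
    obtain ⟨ka, rfl⟩ : ∃ k, fuelA = k + 1 := ⟨fuelA - 1, by omega⟩
    have hnrBA : newRotB (rows : Int) (cols : Int) gB = newRotB (rows : Int) (cols : Int) gA :=
      newRotB_congr rows cols gB gA heq'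
    by_cases hcond : Q ≠ [] ∧ f ≠ 0
    · have hQb : ∀ q ∈ Q, BndP rows cols q := fun q hq => (hQv q hq).1
      obtain ⟨N, hfold, hndN, hNf, hmemN⟩ :=
        levelA_char rows cols gA hsA Q [] [] f hQb List.nodup_nil (by simp)
      simp only [List.nil_append] at hfold hndN hmemN
      have hlevel : levelA gA Q f = (rotAllB gA N, N, f - (N.length : Int)) := by
        unfold levelA
        exact hfold
      have hmem_nr : ∀ p : Int × Int, p ∈ newRotB (rows : Int) (cols : Int) gA ↔ p ∈ N := by
        intro p
        rw [mem_newRotB, hmemN p]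
        constructor
        · rintro ⟨hb, hfr, q, hbq, hv, hadj⟩
          exact Or.inr ⟨hb, hfr, q, hFI p q hb hfr hbq hv hadj, hadj⟩
        · rintro (h | ⟨hb, hfr, q, hq, hadj⟩)
          · cases h
          · exact ⟨hb, hfr, q, (hQv q hq).1, (hQv q hq).2, hadj⟩
      by_cases hnre : newRotB (rows : Int) (cols : Int) gA = []
      · have hN : N = [] := by
          cases hNcase : N with
          | nil => rfl
          | cons a tl =>
            have : a ∈ newRotB (rows : Int) (cols : Int) gA :=
              (hmem_nr a).mpr (by rw [hNcase]; exact List.mem_cons_self ..)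
            rw [hnre] at this
            cases this
        have hnrB : newRotB (rows : Int) (cols : Int) gB = [] := by rw [hnrBA]; exact hnre
        rw [loopA, if_pos hcond]
        simp only [hlevel]
        rw [hN]
        simp only [rotAllB, List.foldl_nil, List.length_nil, Nat.cast_zero, sub_zero]
        rw [loopA_nil, if_neg hcond.2, loopC_stop (rows : Int) (cols : Int) fb gB t hnrB]
        have hfrq : freshC rows cols gB ≠ 0 := by
          rw [← freshC_congr rows cols gA gB heq]
          omega
        simp [(anyFreshB_iff rows cols gB).mpr hfrq]
      · have hNne : N ≠ [] := by
          intro h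
          apply hnre
          refine List.eq_nil_iff_forall_not_mem.mpr (fun p hp => ?_)
          have := (hmem_nr p).mp hp
          rw [h] at this
          cases this
        have hNlen : 1 ≤ N.length := by
          cases N with
          | nil => exact absurd rfl hNne
          | cons a tl => simp
        have hNb : ∀ p ∈ N, BndP rows cols p := fun p hp => (hNf p hp).1
        have hnrb : ∀ p ∈ newRotB (rows : Int) (cols : Int) gB, BndP rows cols p := by
          intro p hp
          rw [hnrBA] at hp
          exact ((mem_newRotB rows cols gA p).mp hp).1
        have hfc := freshC_rotAll rows cols N gA hsA hndN hNf
        have hsA' := shape_rotAll gA rows cols N hsA hNb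
        have hsB' := shape_rotAll gB rows cols (newRotB (rows : Int) (cols : Int) gB) hsB hnrb
        have heq2 : EqR rows cols (rotAllB gA N)
            (rotAllB gB (newRotB (rows : Int) (cols : Int) gB)) := by
          rintro ⟨x, y⟩ hxy
          show pvAt _ x y = pvAt _ x y
          rw [pvAt_rotAll rows cols N gA hsA hNb x y hxy,
            pvAt_rotAll rows cols _ gB hsB hnrb x y hxy]
          have hm : ((x, y) ∈ newRotB (rows : Int) (cols : Int) gB) ↔ ((x, y) ∈ N) := by
            rw [hnrBA]; exact hmem_nr (x, y)
          by_cases hmN : (x, y) ∈ N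
          · rw [if_pos hmN, if_pos (hm.mpr hmN)]
          · have hnm : ¬((x, y) ∈ newRotB (rows : Int) (cols : Int) gB) := fun h => hmN (hm.mp h)
            rw [if_neg hmN, if_neg hnm]
            exact heq (x, y) hxy
        have hQv' : ∀ q ∈ N, BndP rows cols q ∧ pvAt (rotAllB gA N) q.1 q.2 = 2 := by
          intro q hq
          refine ⟨(hNf q hq).1, ?_⟩
          rcases q with ⟨x, y⟩
          rw [pvAt_rotAll rows cols N gA hsA hNb x y (hNf _ hq).1]
          simp [hq]
        have hFI' : ∀ p q : Int × Int, BndP rows cols p →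
            pvAt (rotAllB gA N) p.1 p.2 = 1 → BndP rows cols q →
            pvAt (rotAllB gA N) q.1 q.2 = 2 → Adj q p → q ∈ N := by
          intro p q hbp hfp hbq hvq hadj
          rcases p with ⟨px, py⟩
          rcases q with ⟨qx, qy⟩
          rw [pvAt_rotAll rows cols N gA hsA hNb px py hbp] at hfp
          rw [pvAt_rotAll rows cols N gA hsA hNb qx qy hbq] at hvq
          by_cases hpN : (px, py) ∈ N
          · rw [if_pos hpN] at hfp; cases hfp
          · rw [if_neg hpN] at hfp
            by_cases hqN : (qx, qy) ∈ N
            · exact hqN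
            · rw [if_neg hqN] at hvq
              have hQq := hFI (px, py) (qx, qy) hbp hfp hbq hvq hadj
              have : (px, py) ∈ N := (hmemN (px, py)).mpr (Or.inr ⟨hbp, hfp, _, hQq, hadj⟩)
              exact absurd this hpN
        have hnrBne : newRotB (rows : Int) (cols : Int) gB ≠ [] := by
          rw [hnrBA]; exact hnre
        rw [loopA, if_pos hcond]
        simp only [hlevel]
        rw [loopC_step (rows : Int) (cols : Int) fb gB t hnrBne]
        exact ih ka (rotAllB gA N) (rotAllB gB (newRotB (rows : Int) (cols : Int) gB))
          N (f - (N.length : Int)) (t + 1) hsA' hsB' heq2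
          (by push_cast at hf ⊢; omega) hQv' hFI'
          (by have := hA2 hcond.1; omega)
          (fun _ => by have := hA2 hcond.1; omega)
          (by omega)
    · rw [loopA, if_neg hcond]
      by_cases hf0 : f = 0
      · have hfc : freshC rows cols gA = 0 := by omega
        have hnr : newRotB (rows : Int) (cols : Int) gB = [] := by
          refine List.eq_nil_iff_forall_not_mem.mpr (fun p hp => ?_)
          rw [hnrBA, mem_newRotB] at hp
          exact (freshC_zero_iff rows cols gA).mp hfc p hp.1 hp.2.1
        rw [loopC_stop (rows : Int) (cols : Int) fb gB t hnr]
        have hfq : freshC rows cols gB = 0 := by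
          rw [← freshC_congr rows cols gA gB heq]; exact hfc
        have hany : anyFreshB (rows : Int) (cols : Int) gB = false := by
          rw [← Bool.not_eq_true, anyFreshB_iff]
          omega
        simp [hany, hf0]
      · have hQnil : Q = [] := by tauto
        have hnr : newRotB (rows : Int) (cols : Int) gB = [] := by
          refine List.eq_nil_iff_forall_not_mem.mpr (fun p hp => ?_)
          rw [hnrBA, mem_newRotB] at hp
          obtain ⟨hb, hfr, q, hbq, hv, hadj⟩ := hp
          have := hFI p q hb hfr hbq hv hadj
          rw [hQnil] at this
          cases this
        rw [loopC_stop (rows : Int) (cols : Int) fb gB t hnr]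
        have hfrq : freshC rows cols gB ≠ 0 := by
          rw [← freshC_congr rows cols gA gB heq]
          omega
        simp [(anyFreshB_iff rows cols gB).mpr hfrq, hf0]

-- ===== VERDICT (by name: the statement is the Claim_ definition above) =====
theorem timeToRot_spec : Claim_equal_timeToRot := by
  intro grid _ hpre
  unfold Spec_timeToRot
  by_cases hnil : grid = []
  · subst hnil
    decide
  · have hlen0 : ¬(grid.length = 0) := fun h => hnil (List.length_eq_zero_iff.mp h)
    have hs : ShapeG grid grid.length ((grid.headD []).length) := ⟨rfl, rfl, hpre⟩
    have hscan := scanA_spec grid grid.length ((grid.headD []).length) hs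
    have hfle : freshC grid.length ((grid.headD []).length) grid
        ≤ grid.length * ((grid.headD []).length) := by
      have h1 := List.length_filter_le (fun p => pvAt grid p.1 p.2 == 1)
        (cellsB (grid.length : Int) (((grid.headD []).length : Nat) : Int))
      rw [length_cellsB] at h1
      exact h1
    have hcopy : EqR grid.length ((grid.headD []).length) grid
        (copyB grid (grid.length : Int) (((grid.headD []).length : Nat) : Int)) :=
      fun p hp => (EqR_copyB grid grid.length ((grid.headD []).length) rfl p hp).symm
    have hscopy : ShapeG (copyB grid (grid.length : Int) (((grid.headD []).length : Nat) : Int))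
        grid.length ((grid.headD []).length) :=
      shape_copyB grid grid.length ((grid.headD []).length) rfl (fun _ => rfl)
        (fun h0 => absurd (List.length_eq_zero_iff.mp h0) hnil)
    simp only [timeToRot, timeToRot_alt, hscan, Int.natAbs_natCast, hlen0, if_false,
      ite_false]
    exact simAB grid.length ((grid.headD []).length)
      (grid.length * ((grid.headD []).length) + 1)
      (((cellsB (grid.length : Int) (((grid.headD []).length : Nat) : Int)).filter
          (fun p => pvAt grid p.1 p.2 == 2)).length
        + freshC grid.length ((grid.headD []).length) grid + 1)
      grid (copyB grid (grid.length : Int) (((grid.headD []).length : Nat) : Int))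
      ((cellsB (grid.length : Int) (((grid.headD []).length : Nat) : Int)).filter
          (fun p => pvAt grid p.1 p.2 == 2))
      (((freshC grid.length ((grid.headD []).length) grid : Nat) : Int)) 0
      hs hscopy hcopy rfl
      (fun q hq => by
        have hm := List.mem_filter.mp hq
        exact ⟨(mem_cellsB _ _ q).mp hm.1, by simpa using hm.2⟩)
      (fun p q hbp hfp hbq hvq _ =>
        List.mem_filter.mpr ⟨(mem_cellsB _ _ q).mpr hbq, by simpa using hvq⟩)
      (by omega)
      (fun hne => by
        cases hQ0 : ((cellsB (grid.length : Int) (((grid.headD []).length : Nat) : Int)).filter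
            (fun p => pvAt grid p.1 p.2 == 2)) with
        | nil => exact absurd hQ0 hne
        | cons a tl => simp [hQ0])
      (by omega)
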